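-- pv_equiv track=rewrite | github.com/SarveshMankar/COEP-Comp-Resources | COEP_Semester-5/SE/Python-Assingments.py | print_pyramid_nums
-- ===== SOURCE A (Python) =====
-- def print_pyramid_nums(height):
--     string = ""
--     for i in range(1, height + 1):
--         for j in range(1, height - i + 1):
--             string += " "
--         for k in range(1, i + 1):
--             string += str(k)
--         for l in range(i - 1, 0, -1):
--             string += str(l)
--         string += "\n"
--     return string
-- ===== SOURCE B (Python) =====
-- def print_pyramid_nums(height):
--     rows = []
--     asc = ""
--     desc = ""
--     for i in range(1, height + 1):
--         s = str(i)
--         asc += s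
--         rows.append(" " * (height - i) + asc + desc + "\n")
--         desc = s + desc
--     return "".join(rows)
-- ===== Notes on version B (the rewrite author's own statement) =====
-- stated objective: faster
-- what changed: B carries two accumulator strings (ascending half, descending half) across rows, extending each by one number per row, so each row is built by a constant number of concatenations plus one join at the end, instead of A's three per-row numeric loops doing O(h^2) one-character '+=' appends.
import Mathlib
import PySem

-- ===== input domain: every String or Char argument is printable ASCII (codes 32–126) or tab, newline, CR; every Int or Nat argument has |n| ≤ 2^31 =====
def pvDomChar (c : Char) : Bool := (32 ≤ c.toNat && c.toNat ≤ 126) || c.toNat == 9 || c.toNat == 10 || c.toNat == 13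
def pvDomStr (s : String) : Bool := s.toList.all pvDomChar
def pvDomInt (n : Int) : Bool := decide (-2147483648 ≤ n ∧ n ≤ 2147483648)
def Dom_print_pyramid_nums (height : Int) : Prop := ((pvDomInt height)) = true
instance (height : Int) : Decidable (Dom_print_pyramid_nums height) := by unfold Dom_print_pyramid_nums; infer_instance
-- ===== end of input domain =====

-- B carries the ascending and descending halves as accumulator strings across rows, extending each
-- by one number per row (no per-row numeric loops), instead of A's three character-appending loops per row; objective: alternative.


-- ===== PORT A =====
def print_pyramid_nums (height : Int) : String :=
  (PySem.List.pyRange 1 (height + 1) 1).foldl (fun string i =>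
    let string := (PySem.List.pyRange 1 (height - i + 1) 1).foldl (fun s _ => s ++ " ") string
    let string := (PySem.List.pyRange 1 (i + 1) 1).foldl (fun s k => s ++ PySem.Int.toStr k) string
    let string := (PySem.List.pyRange (i - 1) 0 (-1)).foldl (fun s l => s ++ PySem.Int.toStr l) string
    string ++ "\n") ""

-- ===== PORT B =====
def print_pyramid_nums_alt (height : Int) : String :=
  let st := (PySem.List.pyRange 1 (height + 1) 1).foldl
    (fun (st : List String × String × String) i =>
      let rows := st.1
      let asc := st.2.1
      let desc := st.2.2
      let s := PySem.Int.toStr i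
      let asc := asc ++ s
      let rows := rows ++ [String.ofList (PySem.List.pyRepeat [' '] (height - i)) ++ asc ++ desc ++ "\n"]
      (rows, asc, s ++ desc))
    ([], "", "")
  PySem.Str.join "" st.1

-- ===== PRECONDITION & SPEC =====
def Spec_print_pyramid_nums (height : Int) (out : String) : Prop := out = print_pyramid_nums_alt height
instance (height : Int) (out : String) : Decidable (Spec_print_pyramid_nums height out) := by unfold Spec_print_pyramid_nums; infer_instance

-- ===== CLAIM (what is proved, stated in full; the proofs are below) =====
def Claim_equal_print_pyramid_nums : Prop := ∀ (height : Int), Dom_print_pyramid_nums height → Spec_print_pyramid_nums height (print_pyramid_nums height)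

-- ===== LEMMAS AND PROOFS =====

-- the common row form: padding ++ ascending half (1..i) ++ descending half (i-1..1) ++ newline
def pvRow (height i : Int) : String :=
  String.ofList (PySem.List.pyRepeat [' '] (height - i))
    ++ PySem.Str.join "" ((PySem.List.pyRange 1 (i + 1) 1).map PySem.Int.toStr)
    ++ PySem.Str.join "" ((PySem.List.pyRange (i - 1) 0 (-1)).map PySem.Int.toStr)
    ++ "\n"

theorem pvCharsJoinE_cons (a : List Char) (l : List (List Char)) :
    PySem.Chars.join [] (a :: l) = a ++ PySem.Chars.join [] l := by
  cases l <;> simp [PySem.Chars.join, List.intercalate]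

theorem pvJoinE_cons (a : String) (l : List String) :
    PySem.Str.join "" (a :: l) = a ++ PySem.Str.join "" l := by
  rw [← String.toList_inj]
  simp [PySem.Str.toList_join, pvCharsJoinE_cons]

theorem pvJoinE_append (l1 l2 : List String) :
    PySem.Str.join "" (l1 ++ l2) = PySem.Str.join "" l1 ++ PySem.Str.join "" l2 := by
  induction l1 with
  | nil => simp [show PySem.Str.join "" ([] : List String) = "" from rfl]
  | cons a t ih => simp [pvJoinE_cons, ih, String.append_assoc]

theorem pvFoldlStr (f : Int → String) (xs : List Int) (s : String) :
    xs.foldl (fun t x => t ++ f x) s = s ++ PySem.Str.join "" (xs.map f) := by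
  induction xs generalizing s with
  | nil => simp [show PySem.Str.join "" ([] : List String) = "" from rfl]
  | cons x xs ih => simp only [List.foldl_cons, List.map_cons, pvJoinE_cons, ih,
      String.append_assoc]

theorem pvJoinSpaces (xs : List Int) :
    PySem.Str.join "" (xs.map (fun _ => (" " : String))) =
      String.ofList (List.replicate xs.length ' ') := by
  induction xs with
  | nil => rfl
  | cons x xs ih =>
      rw [← String.toList_inj] at ih ⊢
      simp_all [List.map_cons, pvJoinE_cons, List.replicate_succ]

-- A's body for row i appends exactly pvRow height i
theorem pvAStep (height i : Int) (s : String) :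
    (let string := (PySem.List.pyRange 1 (height - i + 1) 1).foldl (fun s _ => s ++ " ") s
     let string := (PySem.List.pyRange 1 (i + 1) 1).foldl (fun s k => s ++ PySem.Int.toStr k) string
     let string := (PySem.List.pyRange (i - 1) 0 (-1)).foldl (fun s l => s ++ PySem.Int.toStr l) string
     string ++ "\n") = s ++ pvRow height i := by
  simp only []
  rw [show (fun (s : String) (_ : Int) => s ++ " ") = (fun t x => t ++ (fun _ => (" " : String)) x) from rfl]
  rw [pvFoldlStr, pvFoldlStr, pvFoldlStr, pvJoinSpaces, PySem.List.length_pyRange_one]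
  have h1 : height - i + 1 - 1 = height - i := by ring
  rw [h1]
  simp [pvRow, PySem.List.pyRepeat_singleton, String.append_assoc]

theorem pvASide (height : Int) :
    print_pyramid_nums height =
      PySem.Str.join "" ((PySem.List.pyRange 1 (height + 1) 1).map (pvRow height)) := by
  unfold print_pyramid_nums
  rw [show (fun (string : String) (i : Int) =>
      let string := (PySem.List.pyRange 1 (height - i + 1) 1).foldl (fun s _ => s ++ " ") string
      let string := (PySem.List.pyRange 1 (i + 1) 1).foldl (fun s k => s ++ PySem.Int.toStr k) string
      let string := (PySem.List.pyRange (i - 1) 0 (-1)).foldl (fun s l => s ++ PySem.Int.toStr l) string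
      string ++ "\n") = (fun s i => s ++ pvRow height i) from funext fun s => funext fun i => pvAStep height i s]
  rw [pvFoldlStr]
  simp

-- B's loop invariant: with asc/desc holding the joined halves for rows < a, the fold produces the rows a..height
theorem pvBInv (height : Int) (n : Nat) : ∀ (a : Int) (rows : List String) (asc desc : String),
    1 ≤ a → (height + 1 - a).toNat = n →
    asc = PySem.Str.join "" ((PySem.List.pyRange 1 a 1).map PySem.Int.toStr) →
    desc = PySem.Str.join "" ((PySem.List.pyRange (a - 1) 0 (-1)).map PySem.Int.toStr) →
    PySem.Str.join "" ((PySem.List.pyRange a (height + 1) 1).foldl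
      (fun (st : List String × String × String) i =>
        let rows := st.1
        let asc := st.2.1
        let desc := st.2.2
        let s := PySem.Int.toStr i
        let asc := asc ++ s
        let rows := rows ++ [String.ofList (PySem.List.pyRepeat [' '] (height - i)) ++ asc ++ desc ++ "\n"]
        (rows, asc, s ++ desc))
      (rows, asc, desc)).1
    = PySem.Str.join "" rows
        ++ PySem.Str.join "" ((PySem.List.pyRange a (height + 1) 1).map (pvRow height)) := by
  induction n with
  | zero =>
      intro a rows asc desc ha hn hasc hdesc
      have hle : height + 1 ≤ a := by omega
      rw [PySem.List.pyRange_one_eq_nil hle]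
      simp [show PySem.Str.join "" ([] : List String) = "" from rfl]
  | succ m ih =>
      intro a rows asc desc ha hn hasc hdesc
      have hlt : a < height + 1 := by omega
      rw [PySem.List.pyRange_one_cons hlt]
      simp only [List.foldl_cons, List.map_cons]
      rw [ih (a + 1) _ _ _ (by omega) (by omega)
        (by rw [hasc, PySem.List.pyRange_one_succ_right ha]
            simp [pvJoinE_append, pvJoinE_cons,
              show PySem.Str.join "" ([] : List String) = "" from rfl])
        (by rw [hdesc, show a + 1 - 1 = a from by ring,
              PySem.List.pyRange_neg_one_cons (by omega : (0:Int) < a)]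
            simp [pvJoinE_cons])]
      rw [pvJoinE_append, pvJoinE_cons]
      have hrow : String.ofList (PySem.List.pyRepeat [' '] (height - a)) ++ (asc ++ PySem.Int.toStr a) ++ desc ++ "\n"
          = pvRow height a := by
        rw [hasc, hdesc]
        unfold pvRow
        rw [PySem.List.pyRange_one_succ_right ha]
        simp [pvJoinE_append, pvJoinE_cons, String.append_assoc,
          show PySem.Str.join "" ([] : List String) = "" from rfl]
      rw [hrow]
      simp [pvJoinE_cons, String.append_assoc,
        show PySem.Str.join "" ([] : List String) = "" from rfl]

-- ===== VERDICT (by name: the statement is the Claim_ definition above) =====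
theorem print_pyramid_nums_spec : Claim_equal_print_pyramid_nums := by
  intro height _
  unfold Spec_print_pyramid_nums
  rw [pvASide]
  unfold print_pyramid_nums_alt
  simp only []
  rw [pvBInv height (height + 1 - 1).toNat 1 [] "" "" le_rfl rfl
    (by rw [PySem.List.pyRange_one_eq_nil le_rfl]; rfl)
    (by rw [show (1:Int) - 1 = 0 from by ring, PySem.List.pyRange_neg_one_eq_nil le_rfl]; rfl)]
  rfl
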